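-- pv_equiv track=rewrite | github.com/neel-ofar/docuchat-rag | rag_engine.py | _extractive_answer
-- ===== SOURCE A (Python) =====
-- from typing import List, Dict, Tuple, Optional
--
-- def _extractive_answer(query: str, contexts: List[Dict]) -> str:
--     """Fallback extractive answer"""
--     # Find most relevant sentences
--     query_words = set(query.lower().split())
--
--     best_sentences = []
--     for ctx in contexts:
--         sentences = ctx['text'].split('. ')
--         for sent in sentences:
--             sent_words = set(sent.lower().split())
--             overlap = len(query_words & sent_words)
--             if overlap > 2:
--                 best_sentences.append((overlap, sent, ctx['section']))
--
--     best_sentences.sort(reverse=True)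
--
--     if best_sentences:
--         answer = f"According to {best_sentences[0][2]}: {best_sentences[0][1]}"
--         if len(best_sentences) > 1:
--             answer += f". Also, from {best_sentences[1][2]}: {best_sentences[1][1]}"
--         return answer
--
--     return "I found relevant sections but couldn't extract a specific answer. Could you rephrase your question?"
-- ===== SOURCE B (Python) =====
-- from typing import List, Dict
--
--
-- def _extractive_answer(query: str, contexts: List[Dict]) -> str:
--     """Fallback extractive answer: single pass keeping the top two candidates."""
--     query_words = set(query.lower().split())
--
--     best = None
--     second = None
--     for ctx in contexts:
--         for sent in ctx['text'].split('. '):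
--             overlap = len(query_words & set(sent.lower().split()))
--             if overlap > 2:
--                 t = (overlap, sent, ctx['section'])
--                 if best is None or t > best:
--                     second = best
--                     best = t
--                 elif second is None or t > second:
--                     second = t
--
--     if best is None:
--         return "I found relevant sections but couldn't extract a specific answer. Could you rephrase your question?"
--
--     answer = f"According to {best[2]}: {best[1]}"
--     if second is not None:
--         answer += f". Also, from {second[2]}: {second[1]}"
--     return answer
-- ===== Notes on version B (the rewrite author's own statement) =====
-- stated objective: alternative
-- what changed: Instead of collecting all qualifying (overlap, sentence, section) tuples, sorting the whole list in reverse and reading the first two, B makes a single pass keeping only two running variables `best` and `second` (whole-tuple comparison, so the sort's tie-breaking on sentence/section strings is preserved).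
import Mathlib
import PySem

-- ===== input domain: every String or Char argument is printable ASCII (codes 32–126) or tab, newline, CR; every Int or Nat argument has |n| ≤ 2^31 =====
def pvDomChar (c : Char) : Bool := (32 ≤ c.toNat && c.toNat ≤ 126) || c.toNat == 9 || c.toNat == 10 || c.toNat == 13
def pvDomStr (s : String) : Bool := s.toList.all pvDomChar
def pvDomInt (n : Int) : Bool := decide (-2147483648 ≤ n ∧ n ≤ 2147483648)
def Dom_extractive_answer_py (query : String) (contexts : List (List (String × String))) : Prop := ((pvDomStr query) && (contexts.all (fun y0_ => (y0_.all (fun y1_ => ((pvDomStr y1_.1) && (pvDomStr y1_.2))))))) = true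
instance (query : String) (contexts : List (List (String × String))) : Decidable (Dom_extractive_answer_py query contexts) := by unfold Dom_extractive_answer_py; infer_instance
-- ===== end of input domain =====

-- B replaces A's collect-all / sort(reverse=True) / take-first-two by a single pass that keeps
-- only the top two candidate tuples (whole-tuple lexicographic comparison); return values agree on Pre_.

-- shared helpers: Python's lexicographic order on the (overlap, sentence, section) tuples
def pvKey (t : Int × String × String) : Lex (Int × Lex (String × String)) :=
  toLex (t.1, toLex (t.2.1, t.2.2))

-- word set of a string: set(s.lower().split())
def pvWords (s : String) : PySem.Set String :=
  PySem.Set.ofList (PySem.Str.split₀ (PySem.Str.lower s))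

-- overlap = len(query_words & set(sent.lower().split()))
def pvOverlap (qw : PySem.Set String) (sent : String) : Int :=
  PySem.Set.len (PySem.Set.inter qw (pvWords sent))

-- ===== PORT A =====
def extractive_answer_py (query : String) (contexts : List (List (String × String))) : String :=
  let query_words := pvWords query
  -- build the list of all qualifying (overlap, sent, section) tuples, in scan order
  let best_sentences : List (Int × String × String) :=
    contexts.foldl (fun acc ctx =>
      let d := PySem.Dict.ofList ctx
      -- ctx['text'] / ctx['section']: KeyError (= get? none) excluded by Pre_; getD "" otherwise unreachable
      let sentences := (PySem.Str.split? ((d.get? "text").getD "") ". ").getD []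
      sentences.foldl (fun acc2 sent =>
        let overlap := pvOverlap query_words sent
        if 2 < overlap then acc2 ++ [(overlap, sent, (d.get? "section").getD "")] else acc2) acc) []
  -- best_sentences.sort(reverse=True): Python tuple comparison = pvKey lexicographic order
  let sortedL := PySem.List.sorted best_sentences pvKey true
  match sortedL with
  | [] => "I found relevant sections but couldn't extract a specific answer. Could you rephrase your question?"
  | t0 :: rest =>
    let answer := "According to " ++ t0.2.2 ++ ": " ++ t0.2.1
    match rest with
    | [] => answer
    | t1 :: _ => answer ++ ". Also, from " ++ t1.2.2 ++ ": " ++ t1.2.1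

-- ===== PORT B =====
-- one step of B's running top-two update (t > best / t > second is Python tuple comparison)
def pvStep (st : Option (Int × String × String) × Option (Int × String × String))
    (t : Int × String × String) :
    Option (Int × String × String) × Option (Int × String × String) :=
  match st with
  | (none, _) => (some t, none)                 -- best is None: second = best (None); best = t
  | (some bb, s) =>
    if pvKey bb < pvKey t then (some t, some bb)  -- t > best: second = best; best = t
    else match s with
      | none => (some bb, some t)                 -- second is None: second = t
      | some ss => if pvKey ss < pvKey t then (some bb, some t) else (some bb, some ss)

def extractive_answer_py_alt (query : String) (contexts : List (List (String × String))) : String :=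
  let query_words := pvWords query
  let st : Option (Int × String × String) × Option (Int × String × String) :=
    contexts.foldl (fun st ctx =>
      let d := PySem.Dict.ofList ctx
      let sentences := (PySem.Str.split? ((d.get? "text").getD "") ". ").getD []
      sentences.foldl (fun st2 sent =>
        let overlap := pvOverlap query_words sent
        if 2 < overlap then pvStep st2 (overlap, sent, (d.get? "section").getD "") else st2) st)
      (none, none)
  match st with
  | (none, _) => "I found relevant sections but couldn't extract a specific answer. Could you rephrase your question?"
  | (some t0, s) =>
    let answer := "According to " ++ t0.2.2 ++ ": " ++ t0.2.1
    match s with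
    | none => answer
    | some t1 => answer ++ ". Also, from " ++ t1.2.2 ++ ": " ++ t1.2.1

-- ===== PRECONDITION & SPEC =====
-- Pre_ excludes exactly the inputs where Python raises KeyError: a ctx without a 'text' key,
-- or a ctx without a 'section' key that contains a qualifying (overlap > 2) sentence.
def Pre_extractive_answer_py (query : String) (contexts : List (List (String × String))) : Prop :=
  ∀ ctx ∈ contexts, "text" ∈ ctx.map Prod.fst ∧
    ((∃ sent ∈ (PySem.Str.split? (((PySem.Dict.ofList ctx).get? "text").getD "") ". ").getD [],
        2 < pvOverlap (pvWords query) sent) → "section" ∈ ctx.map Prod.fst)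
instance (query : String) (contexts : List (List (String × String))) : Decidable (Pre_extractive_answer_py query contexts) := by unfold Pre_extractive_answer_py; infer_instance

def pvWitness_extractive_answer_py : String × (List (List (String × String))) :=
  ("the cat sat", [[("text", "the cat sat on a mat. dog"), ("section", "Intro")]])

def Spec_extractive_answer_py (query : String) (contexts : List (List (String × String))) (out : String) : Prop := out = extractive_answer_py_alt query contexts
instance (query : String) (contexts : List (List (String × String))) (out : String) : Decidable (Spec_extractive_answer_py query contexts out) := by unfold Spec_extractive_answer_py; infer_instance

-- ===== CLAIM (what is proved, stated in full; the proofs are below) =====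
def Claim_equal_extractive_answer_py : Prop := ∀ (query : String) (contexts : List (List (String × String))), Dom_extractive_answer_py query contexts → Pre_extractive_answer_py query contexts → Spec_extractive_answer_py query contexts (extractive_answer_py query contexts)

-- ===== LEMMAS AND PROOFS =====

-- first two elements of a list, as B's (best, second) state
def pvFirst2 (l : List (Int × String × String)) :
    Option (Int × String × String) × Option (Int × String × String) :=
  (l.head?, l.tail.head?)

-- one descending stable insertion changes the first two elements exactly as pvStep does
theorem pvFirst2_insertBy (x : Int × String × String) (l : List (Int × String × String)) :
    pvFirst2 (PySem.List.insertBy (fun a b => decide (pvKey b < pvKey a)) x l)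
      = pvStep (pvFirst2 l) x := by
  match l with
  | [] => rfl
  | [a] =>
    by_cases h1 : pvKey a < pvKey x <;>
      simp [PySem.List.insertBy, pvFirst2, pvStep, h1]
  | a :: b :: r =>
    by_cases h1 : pvKey a < pvKey x
    · simp [PySem.List.insertBy, pvFirst2, pvStep, h1]
    · by_cases h2 : pvKey b < pvKey x <;>
        simp [PySem.List.insertBy, pvFirst2, pvStep, h1, h2]

theorem pvFoldStep (L : List (Int × String × String)) (l : List (Int × String × String)) :
    L.foldl pvStep (pvFirst2 l)
      = pvFirst2 (L.foldl (fun acc x => PySem.List.insertBy (fun a b => decide (pvKey b < pvKey a)) x acc) l) := by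
  induction L generalizing l with
  | nil => rfl
  | cons x L ih =>
    simp only [List.foldl_cons, ← pvFirst2_insertBy, ih]

-- B's running top-two over any tuple list = first two of sorted(list, reverse=True)
theorem pvTop2_eq_sorted (L : List (Int × String × String)) :
    L.foldl pvStep (none, none) = pvFirst2 (PySem.List.sorted L pvKey true) := by
  have h := pvFoldStep L []
  simpa [pvFirst2, PySem.List.sorted_rev_eq_foldl_insertBy] using h

-- inner loop: running pvStep inline = appending the tuples and folding pvStep afterwards
theorem pvInner {α : Type} (p : α → Prop) [DecidablePred p] (f : α → Int × String × String)
    (ss : List α) (acc : List (Int × String × String)) :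
    ss.foldl (fun st x => if p x then pvStep st (f x) else st) (acc.foldl pvStep (none, none))
      = (ss.foldl (fun a x => if p x then a ++ [f x] else a) acc).foldl pvStep (none, none) := by
  induction ss generalizing acc with
  | nil => rfl
  | cons x ss ih =>
    by_cases h : p x
    · simp only [List.foldl_cons, if_pos h]
      have h2 := ih (acc ++ [f x])
      rw [List.foldl_append] at h2
      simpa using h2
    · simp only [List.foldl_cons, if_neg h]
      exact ih acc

-- the whole nested scan: B's state after both loops = pvStep folded over A's candidate list
theorem pvOuter {α : Type} (p : α → Prop) [DecidablePred p]
    (sents : List (String × String) → List α)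
    (f : List (String × String) → α → Int × String × String)
    (cs : List (List (String × String))) (acc : List (Int × String × String)) :
    cs.foldl (fun st ctx => (sents ctx).foldl (fun st2 x => if p x then pvStep st2 (f ctx x) else st2) st)
        (acc.foldl pvStep (none, none))
      = (cs.foldl (fun a ctx => (sents ctx).foldl (fun a2 x => if p x then a2 ++ [f ctx x] else a2) a) acc).foldl
          pvStep (none, none) := by
  induction cs generalizing acc with
  | nil => rfl
  | cons c cs ih =>
    simp only [List.foldl_cons]
    rw [pvInner p (f c) (sents c) acc]
    exact ih _

-- B's nested scan equals the first two of A's sorted candidate list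
theorem pvBridge (qw : PySem.Set String) (cs : List (List (String × String))) :
    cs.foldl (fun st ctx =>
        ((PySem.Str.split? (((PySem.Dict.ofList ctx).get? "text").getD "") ". ").getD []).foldl
          (fun st2 sent => if 2 < pvOverlap qw sent then
              pvStep st2 (pvOverlap qw sent, sent, ((PySem.Dict.ofList ctx).get? "section").getD "")
            else st2) st) (none, none)
      = pvFirst2 (PySem.List.sorted (cs.foldl (fun acc ctx =>
          ((PySem.Str.split? (((PySem.Dict.ofList ctx).get? "text").getD "") ". ").getD []).foldl
            (fun acc2 sent => if 2 < pvOverlap qw sent then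
                acc2 ++ [(pvOverlap qw sent, sent, ((PySem.Dict.ofList ctx).get? "section").getD "")]
              else acc2) acc) []) pvKey true) :=
  (pvOuter (fun sent => 2 < pvOverlap qw sent)
      (fun ctx => (PySem.Str.split? (((PySem.Dict.ofList ctx).get? "text").getD "") ". ").getD [])
      (fun ctx sent => (pvOverlap qw sent, sent, ((PySem.Dict.ofList ctx).get? "section").getD ""))
      cs []).trans (pvTop2_eq_sorted _)

-- ===== VERDICT (by name: the statement is the Claim_ definition above) =====
theorem extractive_answer_py_spec : Claim_equal_extractive_answer_py := by
  intro query contexts _ _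
  unfold Spec_extractive_answer_py extractive_answer_py extractive_answer_py_alt
  simp only []
  rw [pvBridge]
  generalize PySem.List.sorted _ pvKey true = s
  rcases s with _ | ⟨t0, _ | ⟨t1, rest⟩⟩ <;> rfl
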